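-- pv_equiv track=rewrite | github.com/NTKdz/UET_AICaroGame | backend/TicTacToeAi1.py | evaluate_all_diagonals
-- ===== SOURCE A (Python) =====
-- def evaluate_all_diagonals(board, size, player, opponent):
--     score = 0
--     for d in range(-size + 1, size):
--         diagonal1 = get_diagonal(board, size, d, True)
--         diagonal2 = get_diagonal(board, size, d, False)
--         score += evaluate_line(diagonal1, player, opponent)
--         score += evaluate_line(diagonal2, player, opponent)
--     return score
--
-- def get_diagonal(board, size, offset, top_left_to_bottom_right):
--     diagonal = []
--     for i in range(max(0, offset), min(size, size + offset)):
--         if top_left_to_bottom_right: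
--             j = i - offset
--             if 0 <= j < size:
--                 diagonal.append(board[i][j])
--         else:
--             j = size - 1 - (i - offset)
--             if 0 <= j < size:
--                 diagonal.append(board[i][j])
--     return diagonal
--
-- def evaluate_line(line, player, opponent):
--     score = 0
--
--     # Define patterns and their corresponding weights
--     patterns = {
--         player*5: 10000,
--         player*4 + ' ': 1000,
--         ' ' + player*4: 1000,
--         ' ' + player*3 + ' ': 100,
--         player + ' ' + player*2: 70,
--         player*2 + ' ' + player: 70,
--         player*3 + '  ': 50,
--         '  ' + player*3: 50,
--         player*2 + '   ': 10,
--         ' ' + player*2 + '  ': 10,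
--         '  ' + player*2 + ' ': 10,
--         '   ' + player*2: 10,
--         player + '    ': 1,
--         ' ' + player + '   ': 1,
--         '  ' + player + '  ': 1,
--         '   ' + player + ' ': 1,
--         opponent*5: -10000,
--         opponent*4 + ' ': -2000,
--         ' ' + opponent*4: -2000,
--         opponent*2 + ' ' + opponent: -1000,
--         opponent + ' ' + opponent*2: -1000,
--         ' ' + opponent*3 + ' ': -500,
--         opponent*3 + '  ': -500,
--         '  ' + opponent*3: -500,
--         opponent*2 + '   ': -10,
--         ' ' + opponent*2 + '  ': -10,
--         '  ' + opponent*2: -10,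
--         opponent + '    ': -1,
--         ' ' + opponent + '   ': -1,
--         '  ' + opponent + '  ': -1,
--         '   ' + opponent + ' ': -1,
--         player*3 + ' ' + player + ' ': 90,
--         player + ' ' + player*3 + ' ': 90,
--         ' ' + player*3 + ' ' + player: 90,
--         player + ' ' + player + ' ' + player: 80,
--         ' ' + player + ' ' + player + ' ' + player: 80,
--         player*4: 2000,
--         player*3: 100,
--         player*2: 10,
--         opponent*3 + ' ' + opponent: -200,
--         opponent + ' ' + opponent*3: -200,
--         opponent*4: -2000,
--         opponent*3: -100,
--         opponent*2: -10,
--         opponent + ' ' + player*2: -20,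
--         player*2 + ' ' + opponent: -20,
--         opponent + ' ' + player + ' ' + opponent: -40,
--         player*2 + ' ' + opponent*2: -40,
--         player*3 + ' ' + opponent: 150,
--         opponent + ' ' + player*3: -150,
--         player*4 + ' ' + opponent: 4000,
--         opponent + ' ' + player*4: -4000,
--         player*3 + ' ' + opponent*2: 300,
--         opponent*2 + ' ' + player*3: -300,
--         player*2 + ' ' + opponent*3: 20,
--         opponent*3 + ' ' + player*2: -20,
--     }
--
--     line_str = ''.join(line)
--
--     # Evaluate each pattern and accumulate the score
--     for pattern, value in patterns.items():
--         score += line_str.count(pattern) * value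
--
--     return score
-- ===== SOURCE B (Python) =====
-- # B: template-driven scoring + single row-major bucket pass over the board
-- # (different decomposition from A's per-offset get_diagonal extraction and
-- # literal per-player pattern dict).
--
-- # Each template is a word over 'p' (player), 'o' (opponent), ' ' (gap),
-- # listed in the same order as A's dict literal so duplicate-key overwrite
-- # behaves identically when expanded into a dict.
-- _TEMPLATES = [
--     ("ppppp", 10000), ("pppp ", 1000), (" pppp", 1000), (" ppp ", 100),
--     ("p pp", 70), ("pp p", 70), ("ppp  ", 50), ("  ppp", 50),
--     ("pp   ", 10), (" pp  ", 10), ("  pp ", 10), ("   pp", 10),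
--     ("p    ", 1), (" p   ", 1), ("  p  ", 1), ("   p ", 1),
--     ("ooooo", -10000), ("oooo ", -2000), (" oooo", -2000),
--     ("oo o", -1000), ("o oo", -1000),
--     (" ooo ", -500), ("ooo  ", -500), ("  ooo", -500),
--     ("oo   ", -10), (" oo  ", -10), ("  oo", -10),
--     ("o    ", -1), (" o   ", -1), ("  o  ", -1), ("   o ", -1),
--     ("ppp p ", 90), ("p ppp ", 90), (" ppp p", 90),
--     ("p p p", 80), (" p p p", 80),
--     ("pppp", 2000), ("ppp", 100), ("pp", 10),
--     ("ooo o", -200), ("o ooo", -200),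
--     ("oooo", -2000), ("ooo", -100), ("oo", -10),
--     ("o pp", -20), ("pp o", -20), ("o p o", -40), ("pp oo", -40),
--     ("ppp o", 150), ("o ppp", -150),
--     ("pppp o", 4000), ("o pppp", -4000),
--     ("ppp oo", 300), ("oo ppp", -300),
--     ("pp ooo", 20), ("ooo pp", -20),
-- ]
--
-- def _score_line(cells, player, opponent):
--     table = {}
--     for tmpl, weight in _TEMPLATES:
--         key = ''.join(player if c == 'p' else opponent if c == 'o' else ' '
--                       for c in tmpl)
--         table[key] = weight
--     s = ''.join(cells)
--     return sum(s.count(key) * weight for key, weight in table.items())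
--
-- def evaluate_all_diagonals(board, size, player, opponent):
--     if size <= 0:
--         return 0
--     k = 2 * size - 1
--     mains = [[] for _ in range(k)]   # bucket t: main diagonal with i - j == t - (size - 1)
--     antis = [[] for _ in range(k)]   # bucket t: anti diagonal with i + j == t
--     for i in range(size):
--         row = board[i]
--         for j in range(size):
--             cell = row[j]
--             mains[i - j + size - 1].append(cell)
--             antis[i + j].append(cell)
--     total = 0
--     for line in mains:
--         total += _score_line(line, player, opponent)
--     for line in antis:
--         total += _score_line(line, player, opponent)
--     return total
-- ===== Notes on version B (the rewrite author's own statement) =====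
-- stated objective: alternative
-- what changed: B replaces A's per-offset get_diagonal scans with one row-major pass bucketing each cell by i-j (main) and i+j (anti) diagonal, and replaces A's literal per-player pattern dict with a compact template table over {p,o,space} expanded into the scoring dict.
import Mathlib
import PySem

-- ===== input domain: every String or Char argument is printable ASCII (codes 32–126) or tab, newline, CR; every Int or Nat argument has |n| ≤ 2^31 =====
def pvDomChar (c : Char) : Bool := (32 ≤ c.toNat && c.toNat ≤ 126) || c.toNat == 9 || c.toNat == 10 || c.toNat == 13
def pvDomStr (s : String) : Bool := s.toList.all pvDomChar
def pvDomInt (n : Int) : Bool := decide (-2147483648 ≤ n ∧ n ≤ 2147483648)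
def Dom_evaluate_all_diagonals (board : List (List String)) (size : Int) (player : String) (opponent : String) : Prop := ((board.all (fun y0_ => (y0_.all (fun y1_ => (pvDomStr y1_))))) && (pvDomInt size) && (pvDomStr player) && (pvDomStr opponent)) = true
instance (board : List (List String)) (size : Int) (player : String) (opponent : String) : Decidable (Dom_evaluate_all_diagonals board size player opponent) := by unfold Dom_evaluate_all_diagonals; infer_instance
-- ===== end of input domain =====

-- ===== PORT A =====
-- B keeps the same O(size^2) cost but changes both passes: one row-major bucket pass over the
-- board instead of per-offset diagonal extraction, and a template table expanded into the
-- pattern dict instead of A's literal per-player dict (objective: alternative).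

-- board[i][j], total stand-in: Pre_ guarantees both lookups succeed (Python raises IndexError
-- otherwise, and those inputs are excluded by Pre_evaluate_all_diagonals).
def pyCell (board : List (List String)) (i j : Int) : String :=
  (PySem.List.pyGet? ((PySem.List.pyGet? board i).getD []) j).getD ""

-- A's evaluate_line: the patterns dict literal is the insert chain below (duplicate keys
-- overwrite in place, exactly as in Python); strings handled as List Char (PySem.Chars).
def evaluate_line (line : List String) (player opponent : String) : Int :=
  let p : List Char := player.toList
  let o : List Char := opponent.toList
  let sp : List Char := [' ']
  let patterns : PySem.Dict (List Char) Int :=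
  (PySem.Dict.empty
    |>.insert (p++p++p++p++p) (10000)
    |>.insert (p++p++p++p++sp) (1000)
    |>.insert (sp++p++p++p++p) (1000)
    |>.insert (sp++p++p++p++sp) (100)
    |>.insert (p++sp++p++p) (70)
    |>.insert (p++p++sp++p) (70)
    |>.insert (p++p++p++sp++sp) (50)
    |>.insert (sp++sp++p++p++p) (50)
    |>.insert (p++p++sp++sp++sp) (10)
    |>.insert (sp++p++p++sp++sp) (10)
    |>.insert (sp++sp++p++p++sp) (10)
    |>.insert (sp++sp++sp++p++p) (10)
    |>.insert (p++sp++sp++sp++sp) (1)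
    |>.insert (sp++p++sp++sp++sp) (1)
    |>.insert (sp++sp++p++sp++sp) (1)
    |>.insert (sp++sp++sp++p++sp) (1)
    |>.insert (o++o++o++o++o) (-10000)
    |>.insert (o++o++o++o++sp) (-2000)
    |>.insert (sp++o++o++o++o) (-2000)
    |>.insert (o++o++sp++o) (-1000)
    |>.insert (o++sp++o++o) (-1000)
    |>.insert (sp++o++o++o++sp) (-500)
    |>.insert (o++o++o++sp++sp) (-500)
    |>.insert (sp++sp++o++o++o) (-500)
    |>.insert (o++o++sp++sp++sp) (-10)
    |>.insert (sp++o++o++sp++sp) (-10)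
    |>.insert (sp++sp++o++o) (-10)
    |>.insert (o++sp++sp++sp++sp) (-1)
    |>.insert (sp++o++sp++sp++sp) (-1)
    |>.insert (sp++sp++o++sp++sp) (-1)
    |>.insert (sp++sp++sp++o++sp) (-1)
    |>.insert (p++p++p++sp++p++sp) (90)
    |>.insert (p++sp++p++p++p++sp) (90)
    |>.insert (sp++p++p++p++sp++p) (90)
    |>.insert (p++sp++p++sp++p) (80)
    |>.insert (sp++p++sp++p++sp++p) (80)
    |>.insert (p++p++p++p) (2000)
    |>.insert (p++p++p) (100)
    |>.insert (p++p) (10)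
    |>.insert (o++o++o++sp++o) (-200)
    |>.insert (o++sp++o++o++o) (-200)
    |>.insert (o++o++o++o) (-2000)
    |>.insert (o++o++o) (-100)
    |>.insert (o++o) (-10)
    |>.insert (o++sp++p++p) (-20)
    |>.insert (p++p++sp++o) (-20)
    |>.insert (o++sp++p++sp++o) (-40)
    |>.insert (p++p++sp++o++o) (-40)
    |>.insert (p++p++p++sp++o) (150)
    |>.insert (o++sp++p++p++p) (-150)
    |>.insert (p++p++p++p++sp++o) (4000)
    |>.insert (o++sp++p++p++p++p) (-4000)
    |>.insert (p++p++p++sp++o++o) (300)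
    |>.insert (o++o++sp++p++p++p) (-300)
    |>.insert (p++p++sp++o++o++o) (20)
    |>.insert (o++o++o++sp++p++p) (-20)
  )

  let line_str : List Char := PySem.Chars.join [] (line.map String.toList)
  patterns.items.foldl (fun score pv => score + (PySem.Chars.count line_str pv.1 : Int) * pv.2) 0

def get_diagonal (board : List (List String)) (size offset : Int) (top_left_to_bottom_right : Bool) : List String :=
  (PySem.List.pyRange (max 0 offset) (min size (size + offset)) 1).foldl
    (fun diagonal i =>
      if top_left_to_bottom_right then
        let j := i - offset
        if 0 ≤ j ∧ j < size then diagonal ++ [pyCell board i j] else diagonal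
      else
        let j := size - 1 - (i - offset)
        if 0 ≤ j ∧ j < size then diagonal ++ [pyCell board i j] else diagonal)
    []

def evaluate_all_diagonals (board : List (List String)) (size : Int) (player : String) (opponent : String) : Int :=
  (PySem.List.pyRange (-size + 1) size 1).foldl
    (fun score d =>
      let diagonal1 := get_diagonal board size d true
      let diagonal2 := get_diagonal board size d false
      score + evaluate_line diagonal1 player opponent + evaluate_line diagonal2 player opponent)
    0

-- ===== PORT B =====
-- Source B's _TEMPLATES: each pattern as a word over 'p' (player), 'o' (opponent), ' ' (gap),
-- in A's dict-literal insertion order.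
def pvTemplates : List (List Char × Int) := [
  (['p', 'p', 'p', 'p', 'p'], 10000),
  (['p', 'p', 'p', 'p', ' '], 1000),
  ([' ', 'p', 'p', 'p', 'p'], 1000),
  ([' ', 'p', 'p', 'p', ' '], 100),
  (['p', ' ', 'p', 'p'], 70),
  (['p', 'p', ' ', 'p'], 70),
  (['p', 'p', 'p', ' ', ' '], 50),
  ([' ', ' ', 'p', 'p', 'p'], 50),
  (['p', 'p', ' ', ' ', ' '], 10),
  ([' ', 'p', 'p', ' ', ' '], 10),
  ([' ', ' ', 'p', 'p', ' '], 10),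
  ([' ', ' ', ' ', 'p', 'p'], 10),
  (['p', ' ', ' ', ' ', ' '], 1),
  ([' ', 'p', ' ', ' ', ' '], 1),
  ([' ', ' ', 'p', ' ', ' '], 1),
  ([' ', ' ', ' ', 'p', ' '], 1),
  (['o', 'o', 'o', 'o', 'o'], -10000),
  (['o', 'o', 'o', 'o', ' '], -2000),
  ([' ', 'o', 'o', 'o', 'o'], -2000),
  (['o', 'o', ' ', 'o'], -1000),
  (['o', ' ', 'o', 'o'], -1000),
  ([' ', 'o', 'o', 'o', ' '], -500),
  (['o', 'o', 'o', ' ', ' '], -500),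
  ([' ', ' ', 'o', 'o', 'o'], -500),
  (['o', 'o', ' ', ' ', ' '], -10),
  ([' ', 'o', 'o', ' ', ' '], -10),
  ([' ', ' ', 'o', 'o'], -10),
  (['o', ' ', ' ', ' ', ' '], -1),
  ([' ', 'o', ' ', ' ', ' '], -1),
  ([' ', ' ', 'o', ' ', ' '], -1),
  ([' ', ' ', ' ', 'o', ' '], -1),
  (['p', 'p', 'p', ' ', 'p', ' '], 90),
  (['p', ' ', 'p', 'p', 'p', ' '], 90),
  ([' ', 'p', 'p', 'p', ' ', 'p'], 90),
  (['p', ' ', 'p', ' ', 'p'], 80),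
  ([' ', 'p', ' ', 'p', ' ', 'p'], 80),
  (['p', 'p', 'p', 'p'], 2000),
  (['p', 'p', 'p'], 100),
  (['p', 'p'], 10),
  (['o', 'o', 'o', ' ', 'o'], -200),
  (['o', ' ', 'o', 'o', 'o'], -200),
  (['o', 'o', 'o', 'o'], -2000),
  (['o', 'o', 'o'], -100),
  (['o', 'o'], -10),
  (['o', ' ', 'p', 'p'], -20),
  (['p', 'p', ' ', 'o'], -20),
  (['o', ' ', 'p', ' ', 'o'], -40),
  (['p', 'p', ' ', 'o', 'o'], -40),
  (['p', 'p', 'p', ' ', 'o'], 150),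
  (['o', ' ', 'p', 'p', 'p'], -150),
  (['p', 'p', 'p', 'p', ' ', 'o'], 4000),
  (['o', ' ', 'p', 'p', 'p', 'p'], -4000),
  (['p', 'p', 'p', ' ', 'o', 'o'], 300),
  (['o', 'o', ' ', 'p', 'p', 'p'], -300),
  (['p', 'p', ' ', 'o', 'o', 'o'], 20),
  (['o', 'o', 'o', ' ', 'p', 'p'], -20)
]


-- ''.join(player if c=='p' else opponent if c=='o' else ' ' for c in tmpl)
def pvExpand (player opponent : String) (tmpl : List Char) : List Char :=
  tmpl.flatMap (fun c => if c = 'p' then player.toList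
                         else if c = 'o' then opponent.toList else [' '])

-- Source B's _score_line: build the table from the templates, then sum count*weight over its items.
def score_line (cells : List String) (player opponent : String) : Int :=
  let table : PySem.Dict (List Char) Int :=
    pvTemplates.foldl (fun d tw => d.insert (pvExpand player opponent tw.1) tw.2) PySem.Dict.empty
  let s : List Char := PySem.Chars.join [] (cells.map String.toList)
  (table.items.map (fun kv => (PySem.Chars.count s kv.1 : Int) * kv.2)).sum

-- buckets[t].append(cell); t is always within 0 ≤ t < len buckets at every call site below.
def bucketAppend (buckets : List (List String)) (t : Int) (cell : String) : List (List String) :=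
  PySem.List.pySetD buckets t (PySem.List.pyGetD buckets t [] ++ [cell])

def evaluate_all_diagonals_alt (board : List (List String)) (size : Int) (player : String) (opponent : String) : Int :=
  if size ≤ 0 then 0
  else
    let k := 2 * size - 1
    let empties : List (List String) := (PySem.List.pyRange 0 k 1).map (fun _ => [])
    let st := (PySem.List.pyRange 0 size 1).foldl
      (fun (st : List (List String) × List (List String)) i =>
        let row := (PySem.List.pyGet? board i).getD []
        (PySem.List.pyRange 0 size 1).foldl
          (fun st j =>
            let cell := (PySem.List.pyGet? row j).getD ""
            (bucketAppend st.1 (i - j + size - 1) cell, bucketAppend st.2 (i + j) cell))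
          st)
      (empties, empties)
    let t1 := st.1.foldl (fun total line => total + score_line line player opponent) 0
    st.2.foldl (fun total line => total + score_line line player opponent) t1

-- ===== PRECONDITION & SPEC =====
-- Pre_ excludes exactly the inputs on which Python A raises IndexError: a positive size with fewer
-- than size rows, or one of the first size rows shorter than size (A reads every cell board[i][j]
-- with 0 ≤ i, j < size, and B reads the same cells).  The ports stand in a total default for those
-- reads, so the proved equality does not need Pre_ as a hypothesis; Pre_ marks where Python returns.
def Pre_evaluate_all_diagonals (board : List (List String)) (size : Int) (player : String) (opponent : String) : Prop :=
  0 < size → (size ≤ (board.length : Int) ∧ ∀ row ∈ board.take size.toNat, size ≤ (row.length : Int))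
instance (board : List (List String)) (size : Int) (player : String) (opponent : String) : Decidable (Pre_evaluate_all_diagonals board size player opponent) := by unfold Pre_evaluate_all_diagonals; infer_instance

def pvWitness_evaluate_all_diagonals : List (List String) × Int × String × String := ([["x"]], 1, "x", "o")

def Spec_evaluate_all_diagonals (board : List (List String)) (size : Int) (player : String) (opponent : String) (out : Int) : Prop := out = evaluate_all_diagonals_alt board size player opponent
instance (board : List (List String)) (size : Int) (player : String) (opponent : String) (out : Int) : Decidable (Spec_evaluate_all_diagonals board size player opponent out) := by unfold Spec_evaluate_all_diagonals; infer_instance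

-- ===== CLAIM (what is proved, stated in full; the proofs are below) =====
def Claim_equal_evaluate_all_diagonals : Prop := ∀ (board : List (List String)) (size : Int) (player : String) (opponent : String), Dom_evaluate_all_diagonals board size player opponent → Pre_evaluate_all_diagonals board size player opponent → Spec_evaluate_all_diagonals board size player opponent (evaluate_all_diagonals board size player opponent)

-- ===== LEMMAS AND PROOFS =====

-- B's template table expands to exactly A's pattern dict, and summing the mapped items equals
-- A's foldl, so the two line scorers agree on every line.
lemma score_line_eq (line : List String) (player opponent : String) :
    score_line line player opponent = evaluate_line line player opponent := by
  simp only [score_line, evaluate_line, PySem.List.foldl_add, zero_add]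
  simp [pvTemplates, pvExpand, List.append_assoc]

-- canonical diagonals
def diagRange (size d : Int) : List Int := PySem.List.pyRange (max 0 d) (min size (size + d)) 1

def diagM (board : List (List String)) (size d : Int) : List String :=
  (diagRange size d).map (fun i => pyCell board i (i - d))

def diagA (board : List (List String)) (size d : Int) : List String :=
  (diagRange size d).map (fun i => pyCell board i (size - 1 - (i - d)))

lemma gd_true (board : List (List String)) (size d : Int) :
    get_diagonal board size d true = diagM board size d := by
  unfold get_diagonal diagM diagRange
  simp only [if_true]
  rw [PySem.List.foldl_append_ite (p := fun i => 0 ≤ i - d ∧ i - d < size)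
        (f := fun i => pyCell board i (i - d))]
  rw [List.filter_eq_self.mpr]
  · simp
  · intro i hi
    rw [PySem.List.mem_pyRange_one] at hi
    simp only [decide_eq_true_eq]
    omega

lemma gd_false (board : List (List String)) (size d : Int) :
    get_diagonal board size d false = diagA board size d := by
  unfold get_diagonal diagA diagRange
  simp only [Bool.false_eq_true, if_false]
  rw [PySem.List.foldl_append_ite (p := fun i => 0 ≤ size - 1 - (i - d) ∧ size - 1 - (i - d) < size)
        (f := fun i => pyCell board i (size - 1 - (i - d)))]
  rw [List.filter_eq_self.mpr]
  · simp
  · intro i hi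
    rw [PySem.List.mem_pyRange_one] at hi
    simp only [decide_eq_true_eq]
    omega

lemma foldl_two_add (l : List Int) (f g : Int → Int) (a : Int) :
    l.foldl (fun s d => s + f d + g d) a = a + (l.map (fun d => f d + g d)).sum := by
  induction l generalizing a with
  | nil => simp
  | cons x t ih => simp only [List.foldl_cons, List.map_cons, List.sum_cons, ih]; ring

lemma A_sum (board : List (List String)) (size : Int) (player opponent : String) :
    evaluate_all_diagonals board size player opponent
      = ((PySem.List.pyRange (-size + 1) size 1).map
          (fun d => evaluate_line (diagM board size d) player opponent
                    + evaluate_line (diagA board size d) player opponent)).sum := by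
  unfold evaluate_all_diagonals
  simp only [gd_true, gd_false]
  exact (foldl_two_add _ (fun d => evaluate_line (diagM board size d) player opponent)
    (fun d => evaluate_line (diagA board size d) player opponent) 0).trans (by simp)

lemma bucketAppend_map_range (k' : Nat) (g : Nat → List String) (t : Int) (c : String)
    (h0 : 0 ≤ t) (h1 : t < (k' : Int)) :
    bucketAppend ((List.range k').map g) t c
      = (List.range k').map (fun (u : Nat) => if (u : Int) = t then g u ++ [c] else g u) := by
  unfold bucketAppend
  rw [PySem.List.pySetD_of_nonneg _ _ h0,
      PySem.List.pyGetD_eq_getElem _ _ h0 (by simp; omega)]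
  apply List.ext_getElem (by simp)
  intro nn hn1 hn2
  simp only [List.getElem_set, List.getElem_map, List.getElem_range]
  by_cases h : t.toNat = nn
  · rw [if_pos h, if_pos (by omega), h]
  · rw [if_neg h, if_neg (by omega)]

lemma fold_buckets (κ : Int × Int → Int) (c : Int × Int → String) (L : List (Int × Int))
    (k' : Nat) (g : Nat → List String) (hk : ∀ p ∈ L, 0 ≤ κ p ∧ κ p < (k' : Int)) :
    L.foldl (fun bs p => bucketAppend bs (κ p) (c p)) ((List.range k').map g)
      = (List.range k').map (fun t => g t ++ (L.filter (fun p => κ p == (t : Int))).map c) := by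
  induction L generalizing g with
  | nil => simp
  | cons p rest ih =>
      simp only [List.foldl_cons]
      rw [bucketAppend_map_range k' g (κ p) (c p) (hk p (by simp)).1 (hk p (by simp)).2]
      rw [ih (fun (u : Nat) => if (u : Int) = κ p then g u ++ [c p] else g u)
            (fun q hq => hk q (by simp [hq]))]
      apply List.map_congr_left
      intro t _
      by_cases h : κ p = (t : Int)
      · rw [if_pos h.symm, List.filter_cons_of_pos (by simp [h])]
        simp
      · rw [if_neg (fun hc => h hc.symm), List.filter_cons_of_neg (by simp [h])]

def pairsL (size : Int) : List (Int × Int) :=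
  (PySem.List.pyRange 0 size 1).flatMap (fun i => (PySem.List.pyRange 0 size 1).map (fun j => (i, j)))

lemma inner_fold_pair (board : List (List String)) (size i : Int) (lj : List Int)
    (st : List (List String) × List (List String)) :
    lj.foldl (fun st j =>
        (bucketAppend st.1 (i - j + size - 1)
           ((PySem.List.pyGet? ((PySem.List.pyGet? board i).getD []) j).getD ""),
         bucketAppend st.2 (i + j)
           ((PySem.List.pyGet? ((PySem.List.pyGet? board i).getD []) j).getD ""))) st
      = ((lj.map (fun j => (i, j))).foldl
           (fun bs p => bucketAppend bs (p.1 - p.2 + size - 1) (pyCell board p.1 p.2)) st.1,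
         (lj.map (fun j => (i, j))).foldl
           (fun bs p => bucketAppend bs (p.1 + p.2) (pyCell board p.1 p.2)) st.2) := by
  induction lj generalizing st with
  | nil => simp
  | cons j rest ih =>
      simp only [List.foldl_cons, List.map_cons]
      exact ih _

lemma nested_fold_pair (board : List (List String)) (size : Int) (l : List Int)
    (st : List (List String) × List (List String)) :
    l.foldl (fun st i =>
        (PySem.List.pyRange 0 size 1).foldl (fun st j =>
          (bucketAppend st.1 (i - j + size - 1)
             ((PySem.List.pyGet? ((PySem.List.pyGet? board i).getD []) j).getD ""),
           bucketAppend st.2 (i + j)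
             ((PySem.List.pyGet? ((PySem.List.pyGet? board i).getD []) j).getD ""))) st) st
      = ((l.flatMap (fun i => (PySem.List.pyRange 0 size 1).map (fun j => (i, j)))).foldl
           (fun bs p => bucketAppend bs (p.1 - p.2 + size - 1) (pyCell board p.1 p.2)) st.1,
         (l.flatMap (fun i => (PySem.List.pyRange 0 size 1).map (fun j => (i, j)))).foldl
           (fun bs p => bucketAppend bs (p.1 + p.2) (pyCell board p.1 p.2)) st.2) := by
  induction l generalizing st with
  | nil => simp
  | cons i rest ih =>
      simp only [List.foldl_cons, List.flatMap_cons, List.foldl_append]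
      rw [inner_fold_pair board size i _ st]
      exact ih _

lemma filter_beq_of_nodup (l : List Int) (hl : l.Nodup) (v : Int) :
    l.filter (fun x => x == v) = if v ∈ l then [v] else [] := by
  induction l with
  | nil => simp
  | cons a t ih =>
      rcases List.nodup_cons.mp hl with ⟨ha, ht⟩
      by_cases h : a = v
      · subst h
        rw [List.filter_cons_of_pos (by simp), if_pos (by simp)]
        rw [List.filter_eq_nil_iff.mpr (by intro x hx; simp; rintro rfl; exact ha hx)]
      · rw [List.filter_cons_of_neg (by simp [h]), ih ht]
        by_cases hv : v ∈ t
        · rw [if_pos hv, if_pos (by simp [hv])]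
        · rw [if_neg hv, if_neg (by simp [hv, Ne.symm h])]

lemma flatMap_if_singleton (l : List Int) (P : Int → Prop) [DecidablePred P] (f : Int → String) :
    l.flatMap (fun i => if P i then [f i] else []) = (l.filter (fun i => decide (P i))).map f := by
  induction l with
  | nil => simp
  | cons a t ih =>
      by_cases h : P a
      · rw [List.flatMap_cons, List.filter_cons_of_pos (by simp [h]), if_pos h, List.map_cons, ih]
        rfl
      · rw [List.flatMap_cons, List.filter_cons_of_neg (by simp [h]), if_neg h, ih]
        rfl

lemma filter_range_int (a b lo hi : Int) :
    (PySem.List.pyRange a b 1).filter (fun i => decide (lo ≤ i ∧ i < hi))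
      = PySem.List.pyRange (max a lo) (min b hi) 1 := by
  apply List.Perm.eq_of_pairwise
    (fun x y _ _ h1 h2 => absurd (lt_trans h1 h2) (lt_irrefl x))
  · exact List.Pairwise.filter _ (PySem.List.pairwise_lt_pyRange_one a b)
  · exact PySem.List.pairwise_lt_pyRange_one _ _
  · apply (List.perm_ext_iff_of_nodup (List.Nodup.filter _ (PySem.List.nodup_pyRange_one a b))
      (PySem.List.nodup_pyRange_one _ _)).mpr
    intro x
    simp only [List.mem_filter, PySem.List.mem_pyRange_one, decide_eq_true_eq]
    omega

lemma mLine_eq (board : List (List String)) (size t : Int) :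
    ((pairsL size).filter (fun p => p.1 - p.2 + size - 1 == t)).map (fun p => pyCell board p.1 p.2)
      = diagM board size (t + 1 - size) := by
  unfold pairsL diagM diagRange
  rw [List.filter_flatMap, List.map_flatMap]
  have hinner : ∀ i : Int,
      (((PySem.List.pyRange 0 size 1).map (fun j => (i, j))).filter
          (fun p => p.1 - p.2 + size - 1 == t)).map (fun p => pyCell board p.1 p.2)
        = (if 0 ≤ i - t + size - 1 ∧ i - t + size - 1 < size
            then [pyCell board i (i - t + size - 1)] else []) := by
    intro i
    rw [List.filter_map]
    rw [List.filter_congr (q := fun j => j == i - t + size - 1)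
        (fun j _ => by simp only [Function.comp_apply]
                       exact decide_eq_decide.mpr (by omega))]
    rw [filter_beq_of_nodup _ (PySem.List.nodup_pyRange_one 0 size) (i - t + size - 1)]
    by_cases h : 0 ≤ i - t + size - 1 ∧ i - t + size - 1 < size
    · rw [if_pos (PySem.List.mem_pyRange_one.mpr (by omega)), if_pos h]; rfl
    · rw [if_neg (fun hm => h (by have := PySem.List.mem_pyRange_one.mp hm; omega)), if_neg h]; rfl
  simp only [hinner]
  rw [flatMap_if_singleton _ (fun i => 0 ≤ i - t + size - 1 ∧ i - t + size - 1 < size)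
        (fun i => pyCell board i (i - t + size - 1))]
  rw [List.filter_congr (q := fun i => decide (t + 1 - size ≤ i ∧ i < t + 1))
        (fun i _ => decide_eq_decide.mpr (by omega))]
  rw [filter_range_int 0 size (t + 1 - size) (t + 1)]
  have : min size (t + 1) = min size (size + (t + 1 - size)) := by ring_nf
  rw [this]
  exact List.map_congr_left (fun i _ => by congr 1; omega)

lemma aLine_eq (board : List (List String)) (size t : Int) :
    ((pairsL size).filter (fun p => p.1 + p.2 == t)).map (fun p => pyCell board p.1 p.2)
      = diagA board size (t + 1 - size) := by
  unfold pairsL diagA diagRange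
  rw [List.filter_flatMap, List.map_flatMap]
  have hinner : ∀ i : Int,
      (((PySem.List.pyRange 0 size 1).map (fun j => (i, j))).filter
          (fun p => p.1 + p.2 == t)).map (fun p => pyCell board p.1 p.2)
        = (if 0 ≤ t - i ∧ t - i < size then [pyCell board i (t - i)] else []) := by
    intro i
    rw [List.filter_map]
    rw [List.filter_congr (q := fun j => j == t - i)
        (fun j _ => by simp only [Function.comp_apply]
                       exact decide_eq_decide.mpr (by omega))]
    rw [filter_beq_of_nodup _ (PySem.List.nodup_pyRange_one 0 size) (t - i)]
    by_cases h : 0 ≤ t - i ∧ t - i < size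
    · rw [if_pos (PySem.List.mem_pyRange_one.mpr (by omega)), if_pos h]; rfl
    · rw [if_neg (fun hm => h (by have := PySem.List.mem_pyRange_one.mp hm; omega)), if_neg h]; rfl
  simp only [hinner]
  rw [flatMap_if_singleton _ (fun i => 0 ≤ t - i ∧ t - i < size) (fun i => pyCell board i (t - i))]
  rw [List.filter_congr (q := fun i => decide (t + 1 - size ≤ i ∧ i < t + 1))
        (fun i _ => decide_eq_decide.mpr (by omega))]
  rw [filter_range_int 0 size (t + 1 - size) (t + 1)]
  have : min size (t + 1) = min size (size + (t + 1 - size)) := by ring_nf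
  rw [this]
  exact List.map_congr_left (fun i _ => by congr 1; omega)

lemma B_sum (board : List (List String)) (size : Int) (player opponent : String)
    (hs : ¬ size ≤ 0) :
    evaluate_all_diagonals_alt board size player opponent
      = ((List.range (2 * size - 1).toNat).map
            (fun (t : Nat) => evaluate_line (diagM board size ((t : Int) + 1 - size)) player opponent)).sum
        + ((List.range (2 * size - 1).toNat).map
            (fun (t : Nat) => evaluate_line (diagA board size ((t : Int) + 1 - size)) player opponent)).sum := by
  have hm := mLine_eq board size
  have ha := aLine_eq board size
  unfold pairsL at hm ha
  have hemp : ((PySem.List.pyRange 0 (2 * size - 1) 1).map (fun _ => ([] : List String)))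
      = (List.range (2 * size - 1).toNat).map (fun _ => ([] : List String)) := by
    rw [PySem.List.pyRange_one, List.map_map]
    simp only [Function.comp_def, Int.sub_zero]
  have hbound : ∀ κ : Int × Int → Int, (∀ i j : Int, 0 ≤ i → i < size → 0 ≤ j → j < size →
        0 ≤ κ (i, j) ∧ κ (i, j) < 2 * size - 1) →
      ∀ p ∈ (PySem.List.pyRange 0 size 1).flatMap
          (fun i => (PySem.List.pyRange 0 size 1).map (fun j => (i, j))),
        0 ≤ κ p ∧ κ p < ((2 * size - 1).toNat : Int) := by
    intro κ hκ p hp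
    simp only [List.mem_flatMap, List.mem_map, PySem.List.mem_pyRange_one] at hp
    obtain ⟨i, ⟨hi0, hi1⟩, j, ⟨hj0, hj1⟩, rfl⟩ := hp
    have := hκ i j hi0 hi1 hj0 hj1
    omega
  simp only [evaluate_all_diagonals_alt, if_neg hs]
  rw [nested_fold_pair board size (PySem.List.pyRange 0 size 1)]
  simp only [hemp]
  rw [fold_buckets (fun p => p.1 - p.2 + size - 1) (fun p => pyCell board p.1 p.2) _
        (2 * size - 1).toNat (fun _ => []) (hbound _ (by intro i j _ _ _ _; constructor <;> omega)),
      fold_buckets (fun p => p.1 + p.2) (fun p => pyCell board p.1 p.2) _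
        (2 * size - 1).toNat (fun _ => []) (hbound _ (by intro i j _ _ _ _; constructor <;> omega))]
  rw [PySem.List.foldl_add, PySem.List.foldl_add]
  simp only [List.map_map, Function.comp_def, List.nil_append, zero_add, score_line_eq]
  simp only [hm, ha]

-- ===== VERDICT (by name: the statement is the Claim_ definition above) =====
theorem evaluate_all_diagonals_spec : Claim_equal_evaluate_all_diagonals := by
  intro board size player opponent _ _
  unfold Spec_evaluate_all_diagonals
  by_cases hs : size ≤ 0
  · rw [A_sum, PySem.List.pyRange_one_eq_nil (by omega)]
    simp [evaluate_all_diagonals_alt, if_pos hs]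
  · rw [A_sum, B_sum board size player opponent hs]
    rw [PySem.List.pyRange_one, List.map_map]
    rw [show size - (-size + 1) = 2 * size - 1 by ring]
    rw [show ((fun d => evaluate_line (diagM board size d) player opponent
                + evaluate_line (diagA board size d) player opponent) ∘ fun (k : Nat) => -size + 1 + (k : Int))
          = fun (k : Nat) => evaluate_line (diagM board size ((k : Int) + 1 - size)) player opponent
                + evaluate_line (diagA board size ((k : Int) + 1 - size)) player opponent from
        funext fun k => by simp only [Function.comp_apply]; rw [show -size + 1 + (k : Int) = (k : Int) + 1 - size by ring]]
    rw [PySem.List.sum_map_add_int]
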